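-- pv_equiv track=rewrite | github.com/anoop355/leak-detection-in-water-distribution-networks | generate_test_set.py | extract_block
-- ===== SOURCE A (Python) =====
-- def extract_block(inp_text: str, header: str) -> str:
--     lines = inp_text.splitlines()
--     header_upper = header.upper()
--
--     start = None
--     for i, line in enumerate(lines):
--         if line.strip().upper() == header_upper:
--             start = i
--             break
--     if start is None:
--         return ""
--
--     end = len(lines)
--     for j in range(start + 1, len(lines)):
--         if lines[j].strip().startswith("[") and lines[j].strip().endswith("]"):
--             end = j
--             break
--
--     return "\n".join(lines[start:end]) + "\n"
-- ===== SOURCE B (Python) =====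
-- def extract_block(inp_text: str, header: str) -> str:
--     header_upper = header.upper()
--     started = False
--     collected = []
--     for line in inp_text.splitlines():
--         if not started:
--             if line.strip().upper() == header_upper:
--                 started = True
--                 collected.append(line)
--         else:
--             s = line.strip()
--             if s.startswith("[") and s.endswith("]"):
--                 break
--             collected.append(line)
--     if not started:
--         return ""
--     return "\n".join(collected) + "\n"
-- ===== Notes on version B (the rewrite author's own statement) =====
-- stated objective: simpler
-- what changed: B replaces A's two sequential scans (locate the header by index, then scan range(start+1, len) for the next bracketed section and slice) with one flagged single pass that accumulates the block lines directly, eliminating indices and slicing.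
import Mathlib
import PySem

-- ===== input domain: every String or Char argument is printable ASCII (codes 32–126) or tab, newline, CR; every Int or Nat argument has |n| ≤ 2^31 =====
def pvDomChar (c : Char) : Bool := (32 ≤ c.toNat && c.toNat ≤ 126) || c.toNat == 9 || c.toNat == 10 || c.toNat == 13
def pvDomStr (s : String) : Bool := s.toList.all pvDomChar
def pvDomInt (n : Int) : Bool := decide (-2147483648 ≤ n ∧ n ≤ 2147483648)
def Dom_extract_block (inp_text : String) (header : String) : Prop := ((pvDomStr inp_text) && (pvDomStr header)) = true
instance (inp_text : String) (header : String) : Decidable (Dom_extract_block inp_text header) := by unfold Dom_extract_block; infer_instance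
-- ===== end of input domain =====

-- B fuses A's two scans (locate header, then scan for the next bracketed section) into one
-- flagged single pass with an accumulator; objective: simpler (one traversal, no index arithmetic).

-- ===== PORT A =====
-- first loop of A: scan enumerate(lines) for the first line whose strip().upper() equals header_upper
def pvFindStartA (headerUpper : String) : List (Int × String) → Option Int
  | [] => none
  | (i, line) :: rest =>
      if PySem.Str.upper (PySem.Str.strip line) == headerUpper then some i
      else pvFindStartA headerUpper rest

-- second loop of A: for j in range(start+1, len(lines)): break at the first bracketed line, else end = len(lines)
-- (lines[j] is always in range in A, so `.getD ""` only totalizes an unreachable case)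
def pvFindEndA (lines : List String) : List Int → Int
  | [] => (lines.length : Int)
  | j :: rest =>
      if PySem.Str.startswith (PySem.Str.strip ((PySem.List.pyGet? lines j).getD "")) "[" &&
         PySem.Str.endswith (PySem.Str.strip ((PySem.List.pyGet? lines j).getD "")) "]" then j
      else pvFindEndA lines rest

def extract_block (inp_text : String) (header : String) : String :=
  let lines := PySem.Str.splitlines inp_text
  let headerUpper := PySem.Str.upper header
  match pvFindStartA headerUpper (PySem.List.enumerate lines 0) with
  | none => ""
  | some start =>
      let endI := pvFindEndA lines (PySem.List.pyRange (start + 1) (lines.length : Int) 1)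
      PySem.Str.join "\n" (PySem.List.slice lines (some start) (some endI)) ++ "\n"

-- ===== PORT B =====
def pvTermB (s : String) : Bool := PySem.Str.startswith s "[" && PySem.Str.endswith s "]"

-- B's single pass: (started, collected) accumulator over the lines
def pvGoB (headerUpper : String) : List String → Bool → List String → Bool × List String
  | [], started, collected => (started, collected)
  | line :: rest, started, collected =>
      if !started then
        if PySem.Str.upper (PySem.Str.strip line) == headerUpper then
          pvGoB headerUpper rest true (collected ++ [line])
        else
          pvGoB headerUpper rest false collected
      else
        let s := PySem.Str.strip line
        if pvTermB s then (started, collected)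
        else pvGoB headerUpper rest started (collected ++ [line])

def extract_block_alt (inp_text : String) (header : String) : String :=
  let res := pvGoB (PySem.Str.upper header) (PySem.Str.splitlines inp_text) false []
  if res.1 then PySem.Str.join "\n" res.2 ++ "\n" else ""

-- ===== PRECONDITION & SPEC =====
def Spec_extract_block (inp_text : String) (header : String) (out : String) : Prop := out = extract_block_alt inp_text header
instance (inp_text : String) (header : String) (out : String) : Decidable (Spec_extract_block inp_text header out) := by unfold Spec_extract_block; infer_instance

-- ===== CLAIM (what is proved, stated in full; the proofs are below) =====
def Claim_equal_extract_block : Prop := ∀ (inp_text : String) (header : String), Dom_extract_block inp_text header → Spec_extract_block inp_text header (extract_block inp_text header)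

-- ===== LEMMAS AND PROOFS =====

-- proof-only helpers
def pvMatchH (hU : String) (l : String) : Bool := PySem.Str.upper (PySem.Str.strip l) == hU
def pvTermL (l : String) : Bool := pvTermB (PySem.Str.strip l)

-- common characterisation of both ports: the block is the first header-matching line
-- together with the following lines up to (excluding) the first bracketed line
def pvSpecFun (hU : String) (ls : List String) : String :=
  match ls.dropWhile (fun l => !pvMatchH hU l) with
  | [] => ""
  | m :: restD => PySem.Str.join "\n" (m :: restD.takeWhile (fun l => !pvTermL l)) ++ "\n"

theorem pvGoB_started (hU : String) (ls : List String) (acc : List String) :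
    pvGoB hU ls true acc = (true, acc ++ ls.takeWhile (fun l => !pvTermL l)) := by
  induction ls generalizing acc with
  | nil => simp [pvGoB]
  | cons l rest ih =>
      by_cases h : pvTermB (PySem.Str.strip l) = true
      · simp [pvGoB, h, pvTermL]
      · simp only [Bool.not_eq_true] at h
        simp [pvGoB, h, pvTermL, ih]

theorem pvB_eq_spec (hU : String) (ls : List String) :
    pvGoB hU ls false [] = (match ls.dropWhile (fun l => !pvMatchH hU l) with
      | [] => (false, ([] : List String))
      | m :: restD => (true, m :: restD.takeWhile (fun l => !pvTermL l))) := by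
  induction ls with
  | nil => simp [pvGoB]
  | cons l rest ih =>
      by_cases h : (PySem.Str.upper (PySem.Str.strip l) == hU) = true
      · simp [pvGoB, h, pvGoB_started, pvMatchH]
      · simp only [Bool.not_eq_true] at h
        simp [pvGoB, h, pvMatchH, ih]

theorem pvFindStartA_char (hU : String) (ls : List String) (s : Int) :
    pvFindStartA hU (PySem.List.enumerate ls s) =
      if ls.dropWhile (fun l => !pvMatchH hU l) = [] then none
      else some (s + ((ls.takeWhile (fun l => !pvMatchH hU l)).length : Int)) := by
  induction ls generalizing s with
  | nil => simp [pvFindStartA, PySem.List.enumerate_nil]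
  | cons l rest ih =>
      rw [PySem.List.enumerate_cons]
      by_cases h : (PySem.Str.upper (PySem.Str.strip l) == hU) = true
      · simp [pvFindStartA, h, pvMatchH]
      · simp only [Bool.not_eq_true] at h
        rw [List.dropWhile_cons_of_pos (p := fun x => !pvMatchH hU x)
              (by simp only [pvMatchH, h, Bool.not_false]),
            List.takeWhile_cons_of_pos (p := fun x => !pvMatchH hU x)
              (by simp only [pvMatchH, h, Bool.not_false])]
        simp only [pvFindStartA, h, Bool.false_eq_true, if_false, ih]
        split_ifs with hd
        · rfl
        · simp only [Option.some.injEq, List.length_cons]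
          push_cast
          ring

theorem pvFindEndA_char (lines : List String) (k : Nat) (hk : k ≤ lines.length) :
    pvFindEndA lines (PySem.List.pyRange (k : Int) (lines.length : Int) 1) =
      (k : Int) + (((lines.drop k).takeWhile (fun l => !pvTermL l)).length : Int) := by
  by_cases h : k = lines.length
  · subst h
    rw [PySem.List.pyRange_one_eq_nil (le_refl _)]
    simp [pvFindEndA]
  · have hlt : k < lines.length := lt_of_le_of_ne hk h
    rw [PySem.List.pyRange_one_cons (by exact_mod_cast hlt)]
    have hget : PySem.List.pyGet? lines ((k : Nat) : Int) = some lines[k] := by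
      simp [PySem.List.pyGet?_natCast, List.getElem?_eq_getElem hlt]
    have hdrop : lines.drop k = lines[k] :: lines.drop (k + 1) :=
      List.drop_eq_getElem_cons hlt
    simp only [pvFindEndA, hget, Option.getD_some]
    by_cases ht : (PySem.Str.startswith (PySem.Str.strip lines[k]) "[" &&
        PySem.Str.endswith (PySem.Str.strip lines[k]) "]") = true
    · rw [if_pos ht, hdrop,
          List.takeWhile_cons_of_neg (p := fun l => !pvTermL l)
            (by simp only [pvTermL, pvTermB, ht, Bool.not_true, Bool.false_eq_true,
                  not_false_eq_true])]
      simp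
    · simp only [Bool.not_eq_true] at ht
      rw [if_neg (by simp only [ht, Bool.false_eq_true, not_false_eq_true]), hdrop,
          List.takeWhile_cons_of_pos (p := fun l => !pvTermL l)
            (by simp only [pvTermL, pvTermB, ht, Bool.not_false])]
      have hrec := pvFindEndA_char lines (k + 1) hlt
      rw [show ((k : Nat) : Int) + 1 = (((k + 1 : Nat)) : Int) by push_cast; ring, hrec]
      simp only [List.length_cons]
      push_cast
      ring
  termination_by lines.length - k

theorem pvA_slice (hU : String) (ls : List String) (m : String) (restD : List String)
    (hmr : ls.dropWhile (fun l => !pvMatchH hU l) = m :: restD) :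
    PySem.Str.join "\n" (PySem.List.slice ls
        (some (((ls.takeWhile (fun l => !pvMatchH hU l)).length : Nat) : Int))
        (some (pvFindEndA ls (PySem.List.pyRange
          ((((ls.takeWhile (fun l => !pvMatchH hU l)).length : Nat) : Int) + 1) (ls.length : Int) 1)))) ++ "\n"
      = pvSpecFun hU ls := by
  set n := (ls.takeWhile (fun l => !pvMatchH hU l)).length with hn
  have hsplit : ls.takeWhile (fun l => !pvMatchH hU l) ++ ls.dropWhile (fun l => !pvMatchH hU l) = ls :=
    List.takeWhile_append_dropWhile
  have hdropn : ls.drop n = m :: restD := by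
    conv_lhs => rw [← hsplit]
    rw [hn, List.drop_left, hmr]
  have hlen : n < ls.length := by
    have hl := congrArg List.length hdropn
    simp only [List.length_drop, List.length_cons] at hl
    omega
  have hdropn1 : ls.drop (n + 1) = restD := by
    have h2 := congrArg List.tail hdropn
    simp only [List.tail_drop, List.tail_cons] at h2
    exact h2
  have hcast : ((n : Int)) + 1 = (((n + 1 : Nat)) : Int) := by push_cast; ring
  rw [hcast, pvFindEndA_char ls (n + 1) (by omega), hdropn1]
  set t := (restD.takeWhile (fun l => !pvTermL l)).length with htdef
  have hslice : PySem.List.slice ls (some ((n : Nat) : Int)) (some ((((n + 1 : Nat)) : Int) + (t : Int)))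
      = m :: restD.takeWhile (fun l => !pvTermL l) := by
    rw [show (((n + 1 : Nat)) : Int) + (t : Int) = (((n + 1 + t : Nat)) : Int) by push_cast; ring]
    rw [PySem.List.slice_toNat ls (Int.natCast_nonneg n) (Int.natCast_nonneg (n + 1 + t))]
    simp only [Int.toNat_natCast]
    rw [show n + 1 + t - n = t + 1 by omega, hdropn, List.take_succ_cons]
    congr 1
    obtain ⟨t2, ht2⟩ := (List.takeWhile_prefix (l := restD) (p := fun l => !pvTermL l))
    conv_lhs => rw [← ht2]
    rw [htdef, List.take_left]
  rw [hslice]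
  simp [pvSpecFun, hmr]

theorem pvB_body_eq_spec (hU : String) (ls : List String) :
    (if (pvGoB hU ls false []).1 then PySem.Str.join "\n" (pvGoB hU ls false []).2 ++ "\n" else "")
      = pvSpecFun hU ls := by
  rw [pvB_eq_spec]
  cases hdw : ls.dropWhile (fun l => !pvMatchH hU l) with
  | nil => simp [pvSpecFun, hdw]
  | cons m restD => simp [pvSpecFun, hdw]

-- ===== VERDICT (by name: the statement is the Claim_ definition above) =====
theorem extract_block_spec : Claim_equal_extract_block := by
  intro inp_text header _
  show extract_block inp_text header = extract_block_alt inp_text header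
  have hB : extract_block_alt inp_text header
      = pvSpecFun (PySem.Str.upper header) (PySem.Str.splitlines inp_text) :=
    pvB_body_eq_spec _ _
  rw [hB]
  simp only [extract_block]
  cases hstart : pvFindStartA (PySem.Str.upper header)
      (PySem.List.enumerate (PySem.Str.splitlines inp_text) 0) with
  | none =>
      rw [pvFindStartA_char] at hstart
      by_cases hd : (PySem.Str.splitlines inp_text).dropWhile
          (fun l => !pvMatchH (PySem.Str.upper header) l) = []
      · simp [pvSpecFun, hd]
      · rw [if_neg hd] at hstart
        exact absurd hstart (Option.some_ne_none _)
  | some start =>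
      rw [pvFindStartA_char] at hstart
      cases hdw : (PySem.Str.splitlines inp_text).dropWhile
          (fun l => !pvMatchH (PySem.Str.upper header) l) with
      | nil => rw [if_pos hdw] at hstart; cases hstart
      | cons m restD =>
          rw [if_neg (by simp [hdw])] at hstart
          have hst : start = (((PySem.Str.splitlines inp_text).takeWhile
              (fun l => !pvMatchH (PySem.Str.upper header) l)).length : Int) := by
            injection hstart with h2
            omega
          subst hst
          exact pvA_slice (PySem.Str.upper header) (PySem.Str.splitlines inp_text) m restD hdw
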